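-- pv_equiv track=rewrite | github.com/shunsuke-toba/kaggle-google-code-golf-2025 | 004/2_plain_code.py | p
-- ===== SOURCE A (Python) =====
-- def p(grid):
--     rows = len(grid)
--     cols = len(grid[0])
--     result = [[0 for _ in range(cols)] for _ in range(rows)]
--
--     # 各色の図形を処理
--     for color in range(1, 10):
--         # この色の全てのセルを取得
--         colored_cells = []
--         for r in range(rows):
--             for c in range(cols):
--                 if grid[r][c] == color:
--                     colored_cells.append((r, c))
--
--         if not colored_cells:
--             continue
--
--         # 底部（最下行）の水平線を見つける
--         bottom_row = max(pos[0] for pos in colored_cells)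
--         bottom_cells = [pos for pos in colored_cells if pos[0] == bottom_row]
--
--         if not bottom_cells:
--             continue
--
--         # 底部の右端を特定
--         right_edge_col = max(pos[1] for pos in bottom_cells)
--
--         # 固定する部分：底部 + 右端から上に伸びる垂直線
--         fixed_cells = set(bottom_cells)  # 底部
--
--         # 右端から上に伸びる垂直線を追加
--         for r in range(bottom_row):
--             if (r, right_edge_col) in colored_cells:
--                 fixed_cells.add((r, right_edge_col))
--
--         # 残りのセルを右に1つ移動
--         for r, c in colored_cells:
--             if (r, c) in fixed_cells:
--                 # 固定部分はそのまま
--                 result[r][c] = color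
--             else:
--                 # 右に1つ移動（境界チェック）
--                 if c + 1 < cols:
--                     result[r][c + 1] = color
--
--     return result
-- ===== SOURCE B (Python) =====
-- def p(grid):
--     cols = len(grid[0])
--     # one pass: bucket the cells of each color 1..9 in row-major order
--     buckets = {}
--     for r in range(len(grid)):
--         row = grid[r]
--         for c in range(cols):
--             v = row[c]
--             if 0 < v < 10:
--                 buckets.setdefault(v, []).append((r, c))
--     result = [[0] * cols for _ in grid]
--     for color in sorted(buckets):
--         cells = buckets[color]
--         # row-major order: the last cell is the rightmost cell of the bottom row
--         bottom_row, edge_col = cells[-1]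
--         for r, c in cells:
--             if r == bottom_row or c == edge_col:
--                 result[r][c] = color
--             elif c + 1 < cols:
--                 result[r][c + 1] = color
--     return result
-- ===== Notes on version B (the rewrite author's own statement) =====
-- stated objective: faster
-- what changed: B replaces A's nine separate full-grid scans and its per-row list-membership searches for the vertical edge by a single row-major pass that buckets the colored cells per color in a dict; because the buckets are in row-major order, the last bucketed cell is directly the bottom row's right edge, so the 'fixed cell' test becomes two integer comparisons and the inner membership scans disappear.
import Mathlib
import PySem

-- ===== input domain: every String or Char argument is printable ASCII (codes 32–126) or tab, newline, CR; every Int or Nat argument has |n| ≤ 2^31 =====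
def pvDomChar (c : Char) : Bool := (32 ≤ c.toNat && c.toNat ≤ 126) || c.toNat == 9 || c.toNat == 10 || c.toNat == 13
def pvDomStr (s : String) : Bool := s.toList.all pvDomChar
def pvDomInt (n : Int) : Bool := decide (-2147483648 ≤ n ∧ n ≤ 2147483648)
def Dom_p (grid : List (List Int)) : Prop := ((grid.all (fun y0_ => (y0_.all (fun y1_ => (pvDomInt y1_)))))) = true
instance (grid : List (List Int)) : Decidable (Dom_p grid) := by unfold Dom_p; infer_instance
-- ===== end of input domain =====

-- B replaces A's nine full-grid scans and per-row list-membership searches by ONE row-major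
-- pass that buckets the colored cells per color; the bottom row and its right edge are then
-- just the last bucketed cell, and the "fixed" test becomes two comparisons.

-- result[r][c] = v  (both Pythons assign into an in-range cell of the result grid)
def pvSetCell (res : List (List Int)) (r c : Nat) (v : Int) : List (List Int) :=
  res.set r ((res.getD r []).set c v)

-- ===== PORT A =====
def p (grid : List (List Int)) : List (List Int) :=
  let rows := grid.length
  let cols := (grid.getD 0 []).length
  let result0 : List (List Int) := List.replicate rows (List.replicate cols (0 : Int))
  (PySem.List.pyRange 1 10 1).foldl (fun result color =>
    let colored_cells : List (Nat × Nat) :=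
      (List.range rows).foldl (fun acc r =>
        (List.range cols).foldl (fun acc c =>
          if (grid.getD r []).getD c 0 = color then acc ++ [(r, c)] else acc) acc) []
    match colored_cells with
    | [] => result
    | x :: xs =>
      let bottom_row := xs.foldl (fun m q => max m q.1) x.1
      let bottom_cells := (x :: xs).filter (fun q => q.1 == bottom_row)
      match bottom_cells with
      | [] => result
      | y :: ys =>
        let right_edge_col := ys.foldl (fun m q => max m q.2) y.2
        let fixed0 : PySem.Set (Nat × Nat) := PySem.Set.ofList (y :: ys)
        let fixed := (List.range bottom_row).foldl (fun s r =>
          if (r, right_edge_col) ∈ x :: xs then PySem.Set.add s (r, right_edge_col) else s) fixed0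
        (x :: xs).foldl (fun result q =>
          if q ∈ fixed then pvSetCell result q.1 q.2 color
          else if q.2 + 1 < cols then pvSetCell result q.1 (q.2 + 1) color
          else result) result) result0

-- ===== PORT B =====
def p_alt (grid : List (List Int)) : List (List Int) :=
  let cols := (grid.getD 0 []).length
  let buckets : PySem.Dict Int (List (Nat × Nat)) :=
    (List.range grid.length).foldl (fun d r =>
      (List.range cols).foldl (fun d c =>
        if 0 < (grid.getD r []).getD c 0 ∧ (grid.getD r []).getD c 0 < 10 then
          PySem.Dict.modify d ((grid.getD r []).getD c 0) [] (fun l => l ++ [(r, c)]) else d) d)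
      PySem.Dict.empty
  let result0 : List (List Int) := grid.map (fun _ => List.replicate cols (0 : Int))
  (PySem.List.sorted buckets.keys (fun k => k) false).foldl (fun result color =>
    let cells := buckets.getD color []
    match cells.getLast? with
    | none => result
    | some be =>
      cells.foldl (fun result q =>
        if q.1 = be.1 ∨ q.2 = be.2 then pvSetCell result q.1 q.2 color
        else if q.2 + 1 < cols then pvSetCell result q.1 (q.2 + 1) color
        else result) result) result0

-- ===== PRECONDITION & SPEC =====
-- Pre_: Python A raises IndexError on an empty grid (grid[0]) and on a grid whose later rows
-- are shorter than the first row (grid[r][c] for c < len(grid[0])); exactly those are excluded.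
def Pre_p (grid : List (List Int)) : Prop :=
  grid ≠ [] ∧ ∀ row ∈ grid, (grid.headD []).length ≤ row.length
instance (grid : List (List Int)) : Decidable (Pre_p grid) := by unfold Pre_p; infer_instance

def pvWitness_p : List (List Int) := [[1, 0], [0, 2]]

def Spec_p (grid : List (List Int)) (out : List (List Int)) : Prop := out = p_alt grid
instance (grid : List (List Int)) (out : List (List Int)) : Decidable (Spec_p grid out) := by unfold Spec_p; infer_instance

-- ===== CLAIM (what is proved, stated in full; the proofs are below) =====
def Claim_equal_p : Prop := ∀ (grid : List (List Int)), Dom_p grid → Pre_p grid → Spec_p grid (p grid)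

-- ===== LEMMAS AND PROOFS =====

-- value of the grid at a cell (both ports only read in-range cells, default 0)
def pvVal (grid : List (List Int)) (q : Nat × Nat) : Int := (grid.getD q.1 []).getD q.2 0

-- all cells of a rows × cols grid in row-major order
def pvFlat (rows cols : Nat) : List (Nat × Nat) :=
  (List.range rows).flatMap (fun r => (List.range cols).map (fun c => (r, c)))

-- the cells holding value v, in row-major order
def pvCells (grid : List (List Int)) (cols : Nat) (v : Int) : List (Nat × Nat) :=
  (pvFlat grid.length cols).filter (fun q => pvVal grid q == v)

-- strict row-major (lexicographic) order on cells
def pvLex (a b : Nat × Nat) : Prop := a.1 < b.1 ∨ (a.1 = b.1 ∧ a.2 < b.2)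

-- A's per-colour body, on an explicit cell list
def pvStepA (cols : Nat) (v : Int) (result : List (List Int)) (cells : List (Nat × Nat)) :
    List (List Int) :=
  match cells with
  | [] => result
  | x :: xs =>
    match (x :: xs).filter (fun q => q.1 == xs.foldl (fun m q => max m q.1) x.1) with
    | [] => result
    | y :: ys =>
      (x :: xs).foldl (fun result q =>
        if q ∈ (List.range (xs.foldl (fun m q => max m q.1) x.1)).foldl
            (fun s r => if (r, ys.foldl (fun m q => max m q.2) y.2) ∈ x :: xs then
                PySem.Set.add s (r, ys.foldl (fun m q => max m q.2) y.2) else s)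
            (PySem.Set.ofList (y :: ys))
        then pvSetCell result q.1 q.2 v
        else if q.2 + 1 < cols then pvSetCell result q.1 (q.2 + 1) v
        else result) result

-- B's per-colour body, on an explicit cell list
def pvStepB (cols : Nat) (v : Int) (result : List (List Int)) (cells : List (Nat × Nat)) :
    List (List Int) :=
  match cells.getLast? with
  | none => result
  | some be =>
    cells.foldl (fun result q =>
      if q.1 = be.1 ∨ q.2 = be.2 then pvSetCell result q.1 q.2 v
      else if q.2 + 1 < cols then pvSetCell result q.1 (q.2 + 1) v
      else result) result

lemma pvFlat_pairwise (rows cols : Nat) : (pvFlat rows cols).Pairwise pvLex := by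
  unfold pvFlat
  rw [List.pairwise_flatMap]
  constructor
  · intro r _
    rw [List.pairwise_map]
    exact List.pairwise_lt_range.imp (fun h => Or.inr ⟨rfl, h⟩)
  · apply List.pairwise_lt_range.imp
    intro a b hab
    simp only [List.mem_map, List.mem_range]
    rintro x ⟨c, _, rfl⟩ y ⟨c', _, rfl⟩
    exact Or.inl hab

lemma pvCells_pairwise (grid : List (List Int)) (cols : Nat) (v : Int) :
    (pvCells grid cols v).Pairwise pvLex :=
  List.Pairwise.sublist List.filter_sublist (pvFlat_pairwise _ _)

lemma pvLast_ge {l : List (Nat × Nat)} (hpw : l.Pairwise pvLex) (h : l ≠ []) :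
    ∀ q ∈ l, q = l.getLast h ∨ pvLex q (l.getLast h) := by
  intro q hq
  have hsplit : l.dropLast ++ [l.getLast h] = l := List.dropLast_append_getLast h
  have hpw' : (l.dropLast ++ [l.getLast h]).Pairwise pvLex := by rw [hsplit]; exact hpw
  have hq' : q ∈ l.dropLast ++ [l.getLast h] := by rw [hsplit]; exact hq
  rw [List.pairwise_append] at hpw'
  rcases List.mem_append.mp hq' with h1 | h2
  · exact Or.inr (hpw'.2.2 q h1 _ (by simp))
  · simp only [List.mem_singleton] at h2
    exact Or.inl h2

-- running max of a projection over z :: zs equals any b that bounds it and is attained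
lemma pv_foldl_max_proj {α : Type} (f : α → Nat) (z : α) (zs : List α) (b : Nat)
    (hub : ∀ q ∈ z :: zs, f q ≤ b) (hmem : ∃ q ∈ z :: zs, f q = b) :
    zs.foldl (fun m q => max m (f q)) (f z) = b := by
  have hle := PySem.List.le_foldl_max_nat zs f (f z)
  have hRmem : zs.foldl (fun m q => max m (f q)) (f z) = f z ∨
      zs.foldl (fun m q => max m (f q)) (f z) ∈ zs.map f := by
    have h2 : zs.foldl (fun m q => max m (f q)) (f z) = (zs.map f).foldl max (f z) := by
      rw [List.foldl_map]
    rw [h2]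
    exact PySem.List.foldl_max_mem _ _
  have hup : zs.foldl (fun m q => max m (f q)) (f z) ≤ b := by
    rcases hRmem with h1 | h1
    · rw [h1]; exact hub z (by simp)
    · obtain ⟨q, hq, hfq⟩ := List.mem_map.mp h1
      rw [← hfq]; exact hub q (by simp [hq])
  have hlo : b ≤ zs.foldl (fun m q => max m (f q)) (f z) := by
    obtain ⟨q, hq, hfq⟩ := hmem
    rcases List.mem_cons.mp hq with h1 | h1
    · rw [← hfq, h1]; exact hle.1
    · rw [← hfq]; exact hle.2 q h1
  omega

lemma pv_bottom_eq {x : Nat × Nat} {xs : List (Nat × Nat)}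
    (hpw : (x :: xs).Pairwise pvLex) (hne : x :: xs ≠ []) :
    xs.foldl (fun m q => max m q.1) x.1 = ((x :: xs).getLast hne).1 := by
  refine pv_foldl_max_proj (fun q => q.1) x xs (((x :: xs).getLast hne).1) ?_ ?_
  · intro q hq
    show q.1 ≤ ((x :: xs).getLast hne).1
    rcases pvLast_ge hpw hne q hq with h | h
    · rw [h]
    · rcases h with h | ⟨h, _⟩
      · omega
      · omega
  · exact ⟨_, List.getLast_mem hne, rfl⟩

lemma pv_edge_eq {l : List (Nat × Nat)} (hpw : l.Pairwise pvLex) (hne : l ≠ [])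
    {y : Nat × Nat} {ys : List (Nat × Nat)}
    (hf : l.filter (fun q => q.1 == (l.getLast hne).1) = y :: ys) :
    ys.foldl (fun m q => max m q.2) y.2 = (l.getLast hne).2 := by
  refine pv_foldl_max_proj (fun q => q.2) y ys ((l.getLast hne).2) ?_ ?_
  · intro q hq
    show q.2 ≤ (l.getLast hne).2
    have hq' : q ∈ l.filter (fun q => q.1 == (l.getLast hne).1) := by rw [hf]; exact hq
    rw [List.mem_filter] at hq'
    have h1 : q.1 = (l.getLast hne).1 := by simpa using hq'.2
    rcases pvLast_ge hpw hne q hq'.1 with h | h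
    · rw [h]
    · rcases h with h | ⟨_, h⟩
      · omega
      · omega
  · refine ⟨l.getLast hne, ?_, rfl⟩
    rw [← hf, List.mem_filter]
    exact ⟨List.getLast_mem hne, by simp⟩

lemma pv_mem_fold_add (L : List Nat) (e : Nat) (cells : List (Nat × Nat))
    (s : PySem.Set (Nat × Nat)) (q : Nat × Nat) :
    (q ∈ L.foldl (fun s r => if (r, e) ∈ cells then PySem.Set.add s (r, e) else s) s) ↔
      q ∈ s ∨ ∃ r ∈ L, (r, e) ∈ cells ∧ q = (r, e) := by
  induction L generalizing s with
  | nil => simp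
  | cons a t ih =>
    simp only [List.foldl_cons]
    split_ifs with hmem
    · rw [ih]
      simp only [PySem.Set.mem_add, List.mem_cons]
      constructor
      · rintro (⟨h | h⟩ | ⟨r, hr, hc, rfl⟩)
        · exact Or.inl h
        · exact Or.inr ⟨a, Or.inl rfl, hmem, h⟩
        · exact Or.inr ⟨r, Or.inr hr, hc, rfl⟩
      · rintro (h | ⟨r, hr | hr, hc, rfl⟩)
        · exact Or.inl (Or.inl h)
        · exact Or.inl (Or.inr (by rw [hr]))
        · exact Or.inr ⟨r, hr, hc, rfl⟩
    · rw [ih]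
      simp only [List.mem_cons]
      constructor
      · rintro (h | ⟨r, hr, hc, rfl⟩)
        · exact Or.inl h
        · exact Or.inr ⟨r, Or.inr hr, hc, rfl⟩
      · rintro (h | ⟨r, hr | hr, hc, rfl⟩)
        · exact Or.inl h
        · exact absurd hc (by rw [hr]; exact hmem)
        · exact Or.inr ⟨r, hr, hc, rfl⟩

lemma pv_fixed_iff {l : List (Nat × Nat)} (hpw : l.Pairwise pvLex) (hne : l ≠ [])
    (q : Nat × Nat) (hq : q ∈ l) :
    (q ∈ (List.range (l.getLast hne).1).foldl
        (fun s r => if (r, (l.getLast hne).2) ∈ l then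
            PySem.Set.add s (r, (l.getLast hne).2) else s)
        (PySem.Set.ofList (l.filter (fun p => p.1 == (l.getLast hne).1)))) ↔
      (q.1 = (l.getLast hne).1 ∨ q.2 = (l.getLast hne).2) := by
  rw [pv_mem_fold_add, PySem.Set.mem_ofList, List.mem_filter]
  constructor
  · rintro (⟨_, h⟩ | ⟨r, _, _, rfl⟩)
    · left; simpa using h
    · right; rfl
  · rintro (h | h)
    · exact Or.inl ⟨hq, by simp [h]⟩
    · by_cases h1 : q.1 = (l.getLast hne).1
      · exact Or.inl ⟨hq, by simp [h1]⟩
      · right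
        refine ⟨q.1, ?_, ?_, ?_⟩
        · rw [List.mem_range]
          rcases pvLast_ge hpw hne q hq with h2 | h2
          · exact absurd (by rw [h2]) h1
          · rcases h2 with h2 | ⟨h2, _⟩
            · exact h2
            · exact absurd h2 h1
        · have h2 : (q.1, (l.getLast hne).2) = q := by
            obtain ⟨q1, q2⟩ := q
            simp only at h ⊢
            rw [h]
          rw [h2]; exact hq
        · obtain ⟨q1, q2⟩ := q
          simp only at h ⊢
          rw [h]

lemma pv_A_cells (grid : List (List Int)) (cols : Nat) (v : Int) :
    (List.range grid.length).foldl (fun acc r =>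
        (List.range cols).foldl (fun acc c =>
          if (grid.getD r []).getD c 0 = v then acc ++ [(r, c)] else acc) acc) [] =
      pvCells grid cols v := by
  have inner : ∀ (r : Nat) (acc : List (Nat × Nat)),
      (List.range cols).foldl (fun acc c =>
          if (grid.getD r []).getD c 0 = v then acc ++ [(r, c)] else acc) acc =
        acc ++ ((List.range cols).map (fun c => (r, c))).filter (fun q => pvVal grid q == v) := by
    intro r acc
    rw [PySem.List.foldl_append_ite (p := fun c => (grid.getD r []).getD c 0 = v)
      (f := fun c => ((r, c) : Nat × Nat))]
    rw [List.filter_map]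
    have h : (List.range cols).filter (fun c => decide ((grid.getD r []).getD c 0 = v)) =
        (List.range cols).filter ((fun q => pvVal grid q == v) ∘ (fun c => ((r, c) : Nat × Nat))) :=
      List.filter_congr (fun c _ => by
        simp only [Function.comp_apply, pvVal]
        exact (Bool.beq_eq_decide_eq _ _).symm)
    rw [h]
  rw [PySem.List.foldl_congr_mem _ _
    (fun acc r => acc ++ ((List.range cols).map (fun c => (r, c))).filter (fun q => pvVal grid q == v))
    _ (fun acc r _ => inner r acc)]
  rw [PySem.List.foldl_append_eq_flatMap]
  rw [pvCells, pvFlat, List.filter_flatMap]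
  simp

-- the one-pass bucket dictionary, as a flat grouping fold
def pvGood (grid : List (List Int)) (cols : Nat) : List (Nat × Nat) :=
  (pvFlat grid.length cols).filter (fun q => decide (0 < pvVal grid q ∧ pvVal grid q < 10))

def pvBuckets (grid : List (List Int)) (cols : Nat) : PySem.Dict Int (List (Nat × Nat)) :=
  ((pvGood grid cols).map (fun q => (pvVal grid q, q))).foldl
    (fun d pr => PySem.Dict.modify d pr.1 [] (fun l => l ++ [pr.2])) PySem.Dict.empty

lemma pv_B_buckets (grid : List (List Int)) (cols : Nat) :
    (List.range grid.length).foldl (fun d r =>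
        (List.range cols).foldl (fun d c =>
          if 0 < (grid.getD r []).getD c 0 ∧ (grid.getD r []).getD c 0 < 10 then
            PySem.Dict.modify d ((grid.getD r []).getD c 0) [] (fun l => l ++ [(r, c)]) else d) d)
      PySem.Dict.empty = pvBuckets grid cols := by
  have h1 : (pvFlat grid.length cols).foldl
      (fun d q => if 0 < pvVal grid q ∧ pvVal grid q < 10 then
        PySem.Dict.modify d (pvVal grid q) [] (fun l => l ++ [q]) else d) PySem.Dict.empty =
      (List.range grid.length).foldl (fun d r =>
        (List.range cols).foldl (fun d c =>
          if 0 < (grid.getD r []).getD c 0 ∧ (grid.getD r []).getD c 0 < 10 then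
            PySem.Dict.modify d ((grid.getD r []).getD c 0) [] (fun l => l ++ [(r, c)]) else d) d)
      PySem.Dict.empty := by
    rw [pvFlat, List.foldl_flatMap]
    apply PySem.List.foldl_congr_mem
    intro d r _
    rw [List.foldl_map]
    rfl
  rw [← h1]

  rw [PySem.List.foldl_ite_eq_foldl_filter
    (p := fun q => 0 < pvVal grid q ∧ pvVal grid q < 10)
    (f := fun d q => PySem.Dict.modify d (pvVal grid q) [] (fun l => l ++ [q]))]
  rw [pvBuckets, List.foldl_map]
  rfl

lemma pv_buckets_getD (grid : List (List Int)) (cols : Nat) (v : Int)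
    (h1 : 0 < v) (h2 : v < 10) :
    (pvBuckets grid cols).getD v [] = pvCells grid cols v := by
  rw [pvBuckets, PySem.Dict.getD_foldl_modify_append, PySem.Dict.getD_empty, List.nil_append]
  rw [List.filter_map, List.map_map]
  have h3 : ((fun (x : Int × (Nat × Nat)) => x.2) ∘ (fun q => (pvVal grid q, q))) = id := rfl
  rw [h3, List.map_id]
  rw [pvGood, List.filter_filter, pvCells]
  apply List.filter_congr
  intro q _
  by_cases h : pvVal grid q = v
  · simp [h, h1, h2]
  · simp [h]

lemma pv_buckets_keys (grid : List (List Int)) (cols : Nat) :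
    (pvBuckets grid cols).keys =
      PySem.Set.ofList ((pvGood grid cols).map (fun q => pvVal grid q)) := by
  rw [pvBuckets]
  rw [PySem.Dict.keys_foldl_modify_key ((pvGood grid cols).map (fun q => (pvVal grid q, q)))
    (fun pr => pr.1) [] (fun _ pr => fun l => l ++ [pr.2])]
  rw [PySem.Dict.keys_empty, List.map_map]
  have h3 : ((fun (x : Int × (Nat × Nat)) => x.1) ∘ (fun q => (pvVal grid q, q))) =
      (fun q => pvVal grid q) := rfl
  rw [h3]
  simp [PySem.Set.update, PySem.Set.ofList_eq_foldl]

lemma pv_mem_keys (grid : List (List Int)) (cols : Nat) (v : Int) :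
    v ∈ (pvBuckets grid cols).keys ↔ (0 < v ∧ v < 10 ∧ pvCells grid cols v ≠ []) := by
  rw [pv_buckets_keys, PySem.Set.mem_ofList, List.mem_map]
  constructor
  · rintro ⟨q, hq, rfl⟩
    rw [pvGood, List.mem_filter] at hq
    have hg := of_decide_eq_true hq.2
    refine ⟨hg.1, hg.2, fun hnil => ?_⟩
    have hmem : q ∈ pvCells grid cols (pvVal grid q) := by
      rw [pvCells, List.mem_filter]; exact ⟨hq.1, by simp⟩
    rw [hnil] at hmem
    exact absurd hmem (List.not_mem_nil)
  · rintro ⟨h1, h2, hne⟩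
    obtain ⟨q, hq⟩ := List.exists_mem_of_ne_nil _ hne
    rw [pvCells, List.mem_filter] at hq
    have hv : pvVal grid q = v := by simpa using hq.2
    exact ⟨q, by rw [pvGood, List.mem_filter]; exact ⟨hq.1, by simp [hv, h1, h2]⟩, hv⟩

lemma pv_sorted_keys (grid : List (List Int)) (cols : Nat) :
    PySem.List.sorted (pvBuckets grid cols).keys (fun k => k) =
      (PySem.List.pyRange 1 10 1).filter (fun v => !(pvCells grid cols v).isEmpty) := by
  apply PySem.List.sorted_eq_of_perm_of_pairwise_lt
  · apply List.perm_of_nodup_nodup_toFinset_eq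
    · exact List.Nodup.filter _ (by decide)
    · rw [pv_buckets_keys]; exact PySem.Set.nodup_ofList _
    · ext a
      simp only [List.mem_toFinset, List.mem_filter, PySem.List.mem_pyRange_one,
        Bool.not_eq_eq_eq_not, Bool.not_true, List.isEmpty_eq_false_iff, pv_mem_keys]
      constructor
      · rintro ⟨⟨ha, hb⟩, hc⟩; exact ⟨by omega, by omega, hc⟩
      · rintro ⟨ha, hb, hc⟩; exact ⟨⟨by omega, by omega⟩, hc⟩
  · exact List.Pairwise.sublist List.filter_sublist (by decide)

-- a fold that skips the colours with no cells is a fold over the filtered colour list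
lemma pv_foldl_filter {α β : Type} (pr : α → Bool) (f : β → α → β) (l : List α) (init : β)
    (h : ∀ x ∈ l, pr x = false → ∀ acc, f acc x = acc) :
    l.foldl f init = (l.filter pr).foldl f init := by
  induction l generalizing init with
  | nil => rfl
  | cons a t ih =>
    simp only [List.foldl_cons, List.filter_cons]
    by_cases hp : pr a = true
    · rw [if_pos hp, List.foldl_cons]
      exact ih _ (fun x hx => h x (List.mem_cons_of_mem _ hx))
    · rw [h a (by simp) (by simpa using hp), if_neg (by simpa using hp)]
      exact ih _ (fun x hx => h x (List.mem_cons_of_mem _ hx))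

-- the heart: on a nonempty pairwise-ordered cell list the two per-colour bodies agree
lemma pvStepB_cons (cols : Nat) (v : Int) (result : List (List Int))
    (x : Nat × Nat) (xs : List (Nat × Nat)) :
    pvStepB cols v result (x :: xs) = (x :: xs).foldl (fun result q =>
      if q.1 = ((x :: xs).getLast (List.cons_ne_nil x xs)).1 ∨
          q.2 = ((x :: xs).getLast (List.cons_ne_nil x xs)).2 then
        pvSetCell result q.1 q.2 v
      else if q.2 + 1 < cols then pvSetCell result q.1 (q.2 + 1) v
      else result) result := by
  unfold pvStepB
  rw [List.getLast?_eq_some_getLast (List.cons_ne_nil x xs)]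

lemma pv_body_eq (cols : Nat) (v : Int) (result : List (List Int))
    (x : Nat × Nat) (xs : List (Nat × Nat)) (hpw : (x :: xs).Pairwise pvLex) :
    pvStepA cols v result (x :: xs) = pvStepB cols v result (x :: xs) := by
  have hne : x :: xs ≠ [] := List.cons_ne_nil x xs
  have hLmem : (x :: xs).getLast hne ∈
      (x :: xs).filter (fun q => q.1 == ((x :: xs).getLast hne).1) := by
    rw [List.mem_filter]
    exact ⟨List.getLast_mem hne, by simp⟩
  obtain ⟨y, ys, hf⟩ := List.exists_cons_of_ne_nil (List.ne_nil_of_mem hLmem)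
  show (match (x :: xs).filter (fun q => q.1 == xs.foldl (fun m q => max m q.1) x.1) with
    | [] => result
    | y :: ys =>
      (x :: xs).foldl (fun result q =>
        if q ∈ (List.range (xs.foldl (fun m q => max m q.1) x.1)).foldl
            (fun s r => if (r, ys.foldl (fun m q => max m q.2) y.2) ∈ x :: xs then
                PySem.Set.add s (r, ys.foldl (fun m q => max m q.2) y.2) else s)
            (PySem.Set.ofList (y :: ys))
        then pvSetCell result q.1 q.2 v
        else if q.2 + 1 < cols then pvSetCell result q.1 (q.2 + 1) v
        else result) result) = pvStepB cols v result (x :: xs)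
  rw [pv_bottom_eq hpw hne, hf]
  show (x :: xs).foldl (fun result q =>
      if q ∈ (List.range ((x :: xs).getLast hne).1).foldl
          (fun s r => if (r, ys.foldl (fun m q => max m q.2) y.2) ∈ x :: xs then
              PySem.Set.add s (r, ys.foldl (fun m q => max m q.2) y.2) else s)
          (PySem.Set.ofList (y :: ys))
      then pvSetCell result q.1 q.2 v
      else if q.2 + 1 < cols then pvSetCell result q.1 (q.2 + 1) v
      else result) result = pvStepB cols v result (x :: xs)
  rw [pv_edge_eq hpw hne hf, pvStepB_cons]
  apply PySem.List.foldl_congr_mem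
  intro acc q hq
  refine if_congr ?_ rfl rfl
  rw [← hf]
  exact pv_fixed_iff hpw hne q hq

theorem p_eq_p_alt (grid : List (List Int)) : p grid = p_alt grid := by
  have hA : p grid = (PySem.List.pyRange 1 10 1).foldl
      (fun result v => pvStepA ((grid.getD 0 []).length) v result
        (pvCells grid ((grid.getD 0 []).length) v))
      (List.replicate grid.length (List.replicate ((grid.getD 0 []).length) (0 : Int))) := by
    simp only [p]
    apply PySem.List.foldl_congr_mem
    intro result v _
    rw [pv_A_cells grid ((grid.getD 0 []).length) v]
    rfl
  have hB : p_alt grid = ((PySem.List.pyRange 1 10 1).filter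
        (fun v => !(pvCells grid ((grid.getD 0 []).length) v).isEmpty)).foldl
      (fun result v => pvStepB ((grid.getD 0 []).length) v result
        (pvCells grid ((grid.getD 0 []).length) v))
      (List.replicate grid.length (List.replicate ((grid.getD 0 []).length) (0 : Int))) := by
    simp only [p_alt]
    rw [pv_B_buckets grid ((grid.getD 0 []).length)]
    rw [pv_sorted_keys grid ((grid.getD 0 []).length)]
    rw [List.map_const']
    apply PySem.List.foldl_congr_mem
    intro result v hv
    rw [List.mem_filter, PySem.List.mem_pyRange_one] at hv
    rw [pv_buckets_getD grid _ v (by omega) (by omega)]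
    rfl
  rw [hA, hB]
  rw [pv_foldl_filter (fun v => !(pvCells grid ((grid.getD 0 []).length) v).isEmpty)
    (fun result v => pvStepA ((grid.getD 0 []).length) v result
      (pvCells grid ((grid.getD 0 []).length) v))
    (PySem.List.pyRange 1 10 1)
    (List.replicate grid.length (List.replicate ((grid.getD 0 []).length) (0 : Int)))
    (by
      intro v _ hfalse acc
      have h0 : pvCells grid ((grid.getD 0 []).length) v = [] := by simpa using hfalse
      show pvStepA ((grid.getD 0 []).length) v acc
        (pvCells grid ((grid.getD 0 []).length) v) = acc
      rw [h0]
      rfl)]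
  apply PySem.List.foldl_congr_mem
  intro result v hv
  rw [List.mem_filter] at hv
  have hne : pvCells grid ((grid.getD 0 []).length) v ≠ [] := by simpa using hv.2
  obtain ⟨x, xs, hcells⟩ := List.exists_cons_of_ne_nil hne
  show pvStepA ((grid.getD 0 []).length) v result (pvCells grid ((grid.getD 0 []).length) v) =
    pvStepB ((grid.getD 0 []).length) v result (pvCells grid ((grid.getD 0 []).length) v)
  rw [hcells]
  exact pv_body_eq _ v result x xs (hcells ▸ pvCells_pairwise grid _ v)

-- ===== VERDICT (by name: the statement is the Claim_ definition above) =====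
theorem p_spec : Claim_equal_p := by
  intro grid _ _
  exact p_eq_p_alt grid
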